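-- pv_equiv track=rewrite | github.com/bajjouy/DomainUpgradeFinder | utils.py | parse_domain_list
-- ===== SOURCE A (Python) =====
-- from typing import List
--
-- def parse_domain_list(text: str) -> List[str]:
--     """
--     Parse a text input containing domain names (one per line or comma-separated)
--     """
--     if not text:
--         return []
--
--     # Split by newlines first
--     lines = text.strip().split('\n')
--
--     domains = []
--     for line in lines:
--         # Also split by commas in case multiple domains are on one line
--         line_domains = [d.strip() for d in line.split(',') if d.strip()]
--         domains.extend(line_domains)
--
--     # Remove duplicates while preserving order
--     seen = set()
--     unique_domains = []
--     for domain in domains: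
--         domain_lower = domain.lower()
--         if domain_lower not in seen:
--             seen.add(domain_lower)
--             unique_domains.append(domain)
--
--     return unique_domains
-- ===== SOURCE B (Python) =====
-- from typing import List
--
-- def parse_domain_list(text: str) -> List[str]:
--     """Single character-level scan: build each token, flush on ',' or '\n',
--     strip/skip/dedup (case-insensitively) on the fly -- no intermediate lists."""
--     seen = set()
--     result = []
--     buf = []
--     for ch in text + ',':          # trailing ',' flushes the last token
--         if ch == ',' or ch == '\n':
--             d = ''.join(buf).strip()
--             buf = []
--             if d:
--                 k = d.lower()
--                 if k not in seen:
--                     seen.add(k)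
--                     result.append(d)
--         else:
--             buf.append(ch)
--     return result
-- ===== Notes on version B (the rewrite author's own statement) =====
-- stated objective: alternative
-- what changed: Replaces A's three-phase pipeline (strip+split on newlines, per-line split on commas into an intermediate list, then a separate dedup pass) with one character-level scan that builds each token, flushes on ',' or '\n', and strips/skips/dedups case-insensitively on the fly, with no intermediate lists and no empty-text guard.
import Mathlib
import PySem

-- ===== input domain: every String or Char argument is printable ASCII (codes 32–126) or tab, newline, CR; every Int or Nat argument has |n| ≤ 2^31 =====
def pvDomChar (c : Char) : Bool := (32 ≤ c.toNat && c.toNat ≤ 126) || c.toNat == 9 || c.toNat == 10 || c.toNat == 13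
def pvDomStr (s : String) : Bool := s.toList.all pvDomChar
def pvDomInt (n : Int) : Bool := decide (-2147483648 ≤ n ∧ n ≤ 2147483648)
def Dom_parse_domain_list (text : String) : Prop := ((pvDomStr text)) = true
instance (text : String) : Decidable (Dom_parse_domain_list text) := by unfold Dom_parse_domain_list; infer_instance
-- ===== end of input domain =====

-- B replaces A's split-then-split-then-dedup pipeline by a single character scan
-- that flushes tokens on ',' / '\n' and strips/skips/dedups on the fly (alternative decomposition, same cost).

-- ===== PORT A =====
-- tokens drop whitespace/produce stripped nonempty pieces: [d.strip() for d in line.split(',') if d.strip()]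
def pvStripNE (d : List Char) : Option (List Char) :=
  let s := PySem.Chars.strip d
  if s.isEmpty then none else some s

def parse_domain_list (text : String) : List String :=
  if text = "" then []
  else
    -- lines = text.strip().split('\n')
    let lines : List (List Char) := PySem.Chars.splitOn (PySem.Chars.strip text.toList) ['\n']
    -- domains = []; for line in lines: domains.extend([d.strip() for d in line.split(',') if d.strip()])
    let domains : List (List Char) :=
      lines.foldl (fun acc line => acc ++ (PySem.Chars.splitOn line [',']).filterMap pvStripNE) []
    -- seen = set(); unique_domains = []; for domain in domains: …
    let st : PySem.Set (List Char) × List (List Char) :=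
      domains.foldl (fun st domain =>
        let dl := PySem.Chars.lower domain
        if st.1.contains dl then st else (st.1.add dl, st.2 ++ [domain])) (PySem.Set.empty, [])
    st.2.map String.ofList

-- ===== PORT B =====
def parse_domain_list_alt (text : String) : List String :=
  -- for ch in text + ',': flush buf on ',' / '\n', else append ch to buf
  let st : List Char × PySem.Set (List Char) × List (List Char) :=
    (text.toList ++ [',']).foldl (fun st ch =>
      if ch = ',' ∨ ch = '\n' then
        let d := PySem.Chars.strip st.1
        if d.isEmpty then ([], st.2.1, st.2.2)
        else
          let k := PySem.Chars.lower d
          if st.2.1.contains k then ([], st.2.1, st.2.2)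
          else ([], st.2.1.add k, st.2.2 ++ [d])
      else (st.1 ++ [ch], st.2.1, st.2.2)) ([], PySem.Set.empty, [])
  st.2.2.map String.ofList

-- ===== PRECONDITION & SPEC =====
def Spec_parse_domain_list (text : String) (out : List String) : Prop := out = parse_domain_list_alt text
instance (text : String) (out : List String) : Decidable (Spec_parse_domain_list text out) := by unfold Spec_parse_domain_list; infer_instance

-- ===== CLAIM (what is proved, stated in full; the proofs are below) =====
def Claim_equal_parse_domain_list : Prop := ∀ (text : String), Dom_parse_domain_list text → Spec_parse_domain_list text (parse_domain_list text)

-- ===== LEMMAS AND PROOFS =====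

-- structural single-character splitter: splitC c cs = cs split on the character c
def splitC (c : Char) : List Char → List (List Char)
  | [] => [[]]
  | x :: xs =>
    if x = c then [] :: splitC c xs
    else
      match splitC c xs with
      | [] => [[x]]
      | t :: ts => (x :: t) :: ts

-- split on ',' OR '\n' in one pass
def splitC2 : List Char → List (List Char)
  | [] => [[]]
  | x :: xs =>
    if x = ',' ∨ x = '\n' then [] :: splitC2 xs
    else
      match splitC2 xs with
      | [] => [[x]]
      | t :: ts => (x :: t) :: ts

def consHead (b : List Char) : List (List Char) → List (List Char)
  | [] => [b]
  | t :: ts => (b ++ t) :: ts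

-- token stream with pending buffer b: the canonical spec both ports reduce to
def emitTok (b : List Char) (rest : List (List Char)) : List (List Char) :=
  match pvStripNE b with
  | none => rest
  | some s => s :: rest

def go2 : List Char → List Char → List (List Char)
  | [], b => emitTok b []
  | c :: cs, b => if c = ',' ∨ c = '\n' then emitTok b (go2 cs []) else go2 cs (b ++ [c])

def dstep (st : PySem.Set (List Char) × List (List Char)) (d : List Char) :
    PySem.Set (List Char) × List (List Char) :=
  let dl := PySem.Chars.lower d
  if st.1.contains dl then st else (st.1.add dl, st.2 ++ [d])

theorem splitC_ne_nil (c : Char) (cs : List Char) : splitC c cs ≠ [] := by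
  induction cs with
  | nil => simp [splitC]
  | cons x xs ih =>
    simp only [splitC]
    split
    · simp
    · match h : splitC c xs with
      | [] => exact absurd h ih
      | t :: ts => simp

theorem splitC2_ne_nil (cs : List Char) : splitC2 cs ≠ [] := by
  induction cs with
  | nil => simp [splitC2]
  | cons x xs ih =>
    simp only [splitC2]
    split
    · simp
    · match h : splitC2 xs with
      | [] => exact absurd h ih
      | t :: ts => simp

theorem consHead_nil_of_ne (l : List (List Char)) (h : l ≠ []) : consHead [] l = l := by
  match l with
  | [] => exact absurd rfl h
  | t :: ts => simp [consHead]

-- the fuel-based PySem splitter agrees with splitC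
theorem go_spec (c : Char) (l : List Char) : ∀ (fuel : Nat) (cur : List Char) (accl : List (List Char)),
    l.length < fuel →
    PySem.Chars.splitOn.go [c] fuel l cur accl = accl.reverse ++ consHead cur.reverse (splitC c l) := by
  induction l with
  | nil =>
    intro fuel cur accl h
    match fuel with
    | fuel + 1 => simp [PySem.Chars.splitOn.go, splitC, consHead]
  | cons x xs ih =>
    intro fuel cur accl h
    match fuel with
    | fuel + 1 =>
      rw [PySem.Chars.splitOn.go]
      by_cases hx : x = c
      · have hp : List.isPrefixOf [c] (x :: xs) = true := by
          simp [List.isPrefixOf, hx]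
        simp only [hp, if_pos]
        rw [show List.drop (List.length [c]) (x :: xs) = xs from rfl]
        rw [ih fuel [] (cur.reverse :: accl) (by simpa using Nat.lt_of_succ_lt_succ h)]
        simp only [List.reverse_cons, List.reverse_nil, List.append_assoc]
        rw [consHead_nil_of_ne _ (splitC_ne_nil c xs)]
        simp [splitC, hx, consHead]
      · have hp : List.isPrefixOf [c] (x :: xs) = false := by
          simp [List.isPrefixOf]
          intro hcx; exact absurd hcx.symm hx
        simp only [hp, Bool.false_eq_true, if_false]
        rw [ih fuel (x :: cur) accl (Nat.lt_of_succ_lt_succ h)]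
        simp only [splitC, hx, if_false]
        match hs : splitC c xs with
        | [] => exact absurd hs (splitC_ne_nil c xs)
        | t :: ts => simp [consHead]

theorem splitOn_eq_splitC (c : Char) (cs : List Char) :
    PySem.Chars.splitOn cs [c] = splitC c cs := by
  rw [PySem.Chars.splitOn, go_spec c cs (cs.length + 1) [] [] (Nat.lt_succ_self _)]
  simp [consHead_nil_of_ne _ (splitC_ne_nil c cs)]

-- two-level split flattens to the one-pass split
theorem splitC2_eq_flat (cs : List Char) :
    splitC2 cs = (splitC '\n' cs).flatMap (splitC ',') := by
  induction cs with
  | nil => simp [splitC2, splitC]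
  | cons x xs ih =>
    by_cases hn : x = '\n'
    · subst hn
      simp [splitC2, splitC, ih]
    · by_cases hc : x = ','
      · subst hc
        simp only [splitC, splitC2, if_neg (by decide : ¬(',' : Char) = '\n')]
        match hs : splitC '\n' xs with
        | [] => exact absurd hs (splitC_ne_nil _ xs)
        | t :: ts =>
          rw [hs] at ih
          simp only [List.flatMap_cons, splitC]
          simp only [List.flatMap_cons] at ih
          simp [ih]
      · simp only [splitC2, splitC, if_neg hn, if_neg (by tauto : ¬(x = ',' ∨ x = '\n'))]
        match hs : splitC '\n' xs with
        | [] => exact absurd hs (splitC_ne_nil _ xs)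
        | t :: ts =>
          rw [hs] at ih
          simp only [List.flatMap_cons] at ih ⊢
          match hs2 : splitC ',' t with
          | [] => exact absurd hs2 (splitC_ne_nil _ t)
          | u :: us =>
            rw [hs2] at ih
            simp only [List.cons_append] at ih
            simp only [splitC, if_neg hc, hs2]
            match h2 : splitC2 xs with
            | [] => exact absurd h2 (splitC2_ne_nil xs)
            | v :: vs =>
              rw [h2] at ih
              have hv : v = u ∧ vs = us ++ ts.flatMap (splitC ',') := by
                have := ih
                exact ⟨by injection this, by injection this⟩
              simp [hv.1, hv.2]

-- stripped-nonempty filtering of the one-pass split is the buffered token stream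
theorem filterMap_splitC2 (cs : List Char) : ∀ b : List Char,
    (consHead b (splitC2 cs)).filterMap pvStripNE = go2 cs b := by
  induction cs with
  | nil =>
    intro b
    simp only [splitC2, consHead, go2, List.append_nil, List.filterMap_cons, List.filterMap_nil]
    unfold emitTok
    match pvStripNE b with
    | none => rfl
    | some s => rfl
  | cons c cs ih =>
    intro b
    by_cases hsep : c = ',' ∨ c = '\n'
    · simp only [splitC2, if_pos hsep, consHead, go2, List.append_nil, List.filterMap_cons]
      have := ih []
      rw [consHead_nil_of_ne _ (splitC2_ne_nil cs)] at this
      unfold emitTok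
      match pvStripNE b with
      | none => simpa using this
      | some s => simpa using this
    · simp only [splitC2, if_neg hsep, go2]
      match hs : splitC2 cs with
      | [] => exact absurd hs (splitC2_ne_nil cs)
      | t :: ts =>
        have := ih (b ++ [c])
        rw [hs] at this
        simp only [consHead, List.append_assoc, List.singleton_append] at this ⊢
        exact this

-- strip is unchanged by appending one whitespace character
theorem strip_append_space (b : List Char) (w : Char) (hw : PySem.Chars.isspace w = true) :
    PySem.Chars.strip (b ++ [w]) = PySem.Chars.strip b := by
  unfold PySem.Chars.strip PySem.Chars.lstrip PySem.Chars.rstrip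
  rw [List.dropWhile_append]
  by_cases hb : (List.dropWhile PySem.Chars.isspace b).isEmpty = true
  · simp only [hb, if_pos]
    simp only [List.isEmpty_iff] at hb
    simp [hb, List.dropWhile, hw]
  · simp only [hb, Bool.false_eq_true, if_false]
    simp [hw]

-- go2 only depends on the buffer up to leading whitespace
theorem go2_buf_congr (cs : List Char) : ∀ b b' : List Char,
    PySem.Chars.lstrip b = PySem.Chars.lstrip b' → go2 cs b = go2 cs b' := by
  induction cs with
  | nil =>
    intro b b' h
    simp only [go2]
    unfold emitTok pvStripNE PySem.Chars.strip
    rw [h]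
  | cons c cs ih =>
    intro b b' h
    by_cases hsep : c = ',' ∨ c = '\n'
    · simp only [go2, if_pos hsep]
      unfold emitTok pvStripNE PySem.Chars.strip
      rw [h]
    · simp only [go2, if_neg hsep]
      apply ih
      unfold PySem.Chars.lstrip at h ⊢
      rw [List.dropWhile_append, List.dropWhile_append, h]

-- trailing whitespace never contributes a token
theorem go2_space_only (ws : List Char) (hws : ∀ w ∈ ws, PySem.Chars.isspace w = true) :
    ∀ b, go2 ws b = emitTok b [] := by
  induction ws with
  | nil => intro b; rfl
  | cons w ws ih =>
    intro b
    have hw : PySem.Chars.isspace w = true := hws w (List.mem_cons_self)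
    have hws' : ∀ x ∈ ws, PySem.Chars.isspace x = true := fun x hx => hws x (List.mem_cons_of_mem _ hx)
    by_cases hsep : w = ',' ∨ w = '\n'
    · simp only [go2, if_pos hsep]
      rw [ih hws' []]
      have : emitTok [] ([] : List (List Char)) = [] := by
        unfold emitTok pvStripNE
        simp [PySem.Chars.strip, PySem.Chars.lstrip, PySem.Chars.rstrip]
      rw [this]
    · simp only [go2, if_neg hsep]
      rw [ih hws' (b ++ [w])]
      unfold emitTok pvStripNE
      rw [strip_append_space b w hw]

theorem go2_append_space (ds ws : List Char) (hws : ∀ w ∈ ws, PySem.Chars.isspace w = true) :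
    ∀ b, go2 (ds ++ ws) b = go2 ds b := by
  induction ds with
  | nil => intro b; rw [List.nil_append, go2_space_only ws hws b]; rfl
  | cons d ds ih =>
    intro b
    by_cases hsep : d = ',' ∨ d = '\n'
    · simp only [List.cons_append, go2, if_pos hsep, ih]
    · simp only [List.cons_append, go2, if_neg hsep, ih]

theorem go2_prepend_space (ws : List Char) (hws : ∀ w ∈ ws, PySem.Chars.isspace w = true) (ds : List Char) :
    go2 (ws ++ ds) [] = go2 ds [] := by
  induction ws with
  | nil => rfl
  | cons w ws ih =>
    have hw : PySem.Chars.isspace w = true := hws w (List.mem_cons_self)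
    have hws' : ∀ x ∈ ws, PySem.Chars.isspace x = true := fun x hx => hws x (List.mem_cons_of_mem _ hx)
    by_cases hsep : w = ',' ∨ w = '\n'
    · simp only [List.cons_append, go2, if_pos hsep]
      rw [ih hws']
      unfold emitTok pvStripNE
      simp [PySem.Chars.strip, PySem.Chars.lstrip, PySem.Chars.rstrip]
    · simp only [List.cons_append, go2, if_neg hsep, List.nil_append]
      rw [go2_buf_congr (ws ++ ds) [w] [] (by simp [PySem.Chars.lstrip, List.dropWhile, hw])]
      exact ih hws'

theorem go2_strip (cs : List Char) : go2 (PySem.Chars.strip cs) [] = go2 cs [] := by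
  have h1 : cs = cs.takeWhile PySem.Chars.isspace ++ PySem.Chars.lstrip cs := by
    unfold PySem.Chars.lstrip; rw [List.takeWhile_append_dropWhile]
  have h2 : PySem.Chars.lstrip cs =
      PySem.Chars.strip cs ++ ((PySem.Chars.lstrip cs).reverse.takeWhile PySem.Chars.isspace).reverse := by
    unfold PySem.Chars.strip PySem.Chars.rstrip
    rw [← List.reverse_append, List.takeWhile_append_dropWhile, List.reverse_reverse]
  calc go2 (PySem.Chars.strip cs) []
      = go2 (PySem.Chars.strip cs ++ ((PySem.Chars.lstrip cs).reverse.takeWhile PySem.Chars.isspace).reverse) [] := by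
        rw [go2_append_space]
        intro w hw
        rw [List.mem_reverse] at hw
        exact List.mem_takeWhile_imp hw
    _ = go2 (PySem.Chars.lstrip cs) [] := by rw [← h2]
    _ = go2 (cs.takeWhile PySem.Chars.isspace ++ PySem.Chars.lstrip cs) [] := by
        rw [go2_prepend_space]
        intro w hw
        exact List.mem_takeWhile_imp hw
    _ = go2 cs [] := by rw [← h1]

-- the scanner (B) is the dedup fold over the token stream
theorem scan_eq_fold (cs : List Char) : ∀ (b : List Char) (st : PySem.Set (List Char) × List (List Char)),
    (cs ++ [',']).foldl (fun st ch =>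
      if ch = ',' ∨ ch = '\n' then
        let d := PySem.Chars.strip st.1
        if d.isEmpty then ([], st.2.1, st.2.2)
        else
          let k := PySem.Chars.lower d
          if st.2.1.contains k then ([], st.2.1, st.2.2)
          else ([], st.2.1.add k, st.2.2 ++ [d])
      else (st.1 ++ [ch], st.2.1, st.2.2)) (b, st)
    = ([], (go2 cs b).foldl dstep st) := by
  induction cs with
  | nil =>
    intro b st
    simp only [List.nil_append, List.foldl_cons, List.foldl_nil]
    rw [show go2 [] b = emitTok b [] from rfl]
    have hsep : (',' : Char) = ',' ∨ (',' : Char) = '\n' := Or.inl rfl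
    simp only [true_or, if_true]
    unfold emitTok pvStripNE dstep
    by_cases hd : (PySem.Chars.strip b).isEmpty = true
    · simp only [hd, if_pos, List.foldl_nil]
    · simp only [hd, Bool.false_eq_true, if_false, List.foldl_cons, List.foldl_nil]
      split <;> rfl
  | cons c cs ih =>
    intro b st
    by_cases hsep : c = ',' ∨ c = '\n'
    · simp only [List.cons_append, List.foldl_cons, if_pos hsep, go2]
      unfold emitTok pvStripNE dstep
      by_cases hd : (PySem.Chars.strip b).isEmpty = true
      · simp only [hd, if_pos]
        exact ih [] st
      · simp only [hd, Bool.false_eq_true, if_false]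
        by_cases hc : st.1.contains (PySem.Chars.lower (PySem.Chars.strip b)) = true
        · simp only [hc, if_pos, List.foldl_cons]
          rw [ih [] st]
          unfold dstep
          simp
        · simp only [hc, Bool.false_eq_true, if_false, List.foldl_cons]
          rw [ih [] (st.1.add (PySem.Chars.lower (PySem.Chars.strip b)), st.2 ++ [PySem.Chars.strip b])]
          unfold dstep
          simp
    · simp only [List.cons_append, List.foldl_cons, if_neg hsep, go2]
      exact ih (b ++ [c]) st

-- A's extend loop is a flatMap
theorem foldl_extend (f : List Char → List (List Char)) (ls : List (List Char)) :
    ∀ acc, ls.foldl (fun acc line => acc ++ f line) acc = acc ++ ls.flatMap f := by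
  induction ls with
  | nil => intro acc; simp
  | cons l ls ih => intro acc; simp [ih]

theorem filterMap_flatMap_stripNE (cs : List Char) :
    ((splitC '\n' cs).flatMap (splitC ',')).filterMap pvStripNE = go2 cs [] := by
  rw [← splitC2_eq_flat]
  have := filterMap_splitC2 cs []
  rwa [consHead_nil_of_ne _ (splitC2_ne_nil cs)] at this

theorem go2_nil : go2 [] [] = [] := by
  unfold go2 emitTok pvStripNE
  simp [PySem.Chars.strip, PySem.Chars.lstrip, PySem.Chars.rstrip]

-- ===== VERDICT (by name: the statement is the Claim_ definition above) =====
theorem parse_domain_list_spec : Claim_equal_parse_domain_list := by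
  intro text _
  unfold Spec_parse_domain_list parse_domain_list parse_domain_list_alt
  rw [scan_eq_fold text.toList [] (PySem.Set.empty, [])]
  by_cases ht : text = ""
  · subst ht
    simp only [reduceIte]
    have : String.toList "" = [] := rfl
    rw [this, go2_nil]
    rfl
  · simp only [if_neg ht]
    simp only [splitOn_eq_splitC]
    rw [foldl_extend, List.nil_append, ← List.filterMap_flatMap]
    rw [filterMap_flatMap_stripNE, go2_strip]
    rfl
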